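-- pv_equiv track=rewrite | github.com/boringhexi/gitarootools | gitarootools/miscutils/datautils.py | interleave_uneven
-- ===== SOURCE A (Python) =====
-- def interleave_uneven(iter1, iter2):
--     """alternately yield elements from iter1 and iter2, even if lengths don't match
--
--     if the end of one iterator is reached first, continue to yield from the remaining
--     one, e.g. interleave_uneven([1,2], [a,b,c,d]) yields 1,a,2,b,c,d
--     """
--     list1, list2 = list(iter1), list(iter2)
--     while 1:
--         if list1:
--             yield list1.pop(0)
--         else:
--             yield from list2
--             return
--         if list2:
--             yield list2.pop(0)
--         else:
--             yield from list1
--             return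
-- ===== SOURCE B (Python) =====
-- import itertools
--
--
-- def interleave_uneven(iter1, iter2):
--     """alternately yield elements from iter1 and iter2, even if lengths don't match"""
--     _fill = object()
--     for x in itertools.chain.from_iterable(
--         itertools.zip_longest(iter1, iter2, fillvalue=_fill)
--     ):
--         if x is not _fill:
--             yield x
-- ===== Notes on version B (the rewrite author's own statement) =====
-- stated objective: faster
-- what changed: Replaces the explicit while-loop with quadratic pop(0)/yield-from branches by itertools.zip_longest with a sentinel fillvalue, flattened via chain.from_iterable and filtered by identity against the sentinel.
import Mathlib
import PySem

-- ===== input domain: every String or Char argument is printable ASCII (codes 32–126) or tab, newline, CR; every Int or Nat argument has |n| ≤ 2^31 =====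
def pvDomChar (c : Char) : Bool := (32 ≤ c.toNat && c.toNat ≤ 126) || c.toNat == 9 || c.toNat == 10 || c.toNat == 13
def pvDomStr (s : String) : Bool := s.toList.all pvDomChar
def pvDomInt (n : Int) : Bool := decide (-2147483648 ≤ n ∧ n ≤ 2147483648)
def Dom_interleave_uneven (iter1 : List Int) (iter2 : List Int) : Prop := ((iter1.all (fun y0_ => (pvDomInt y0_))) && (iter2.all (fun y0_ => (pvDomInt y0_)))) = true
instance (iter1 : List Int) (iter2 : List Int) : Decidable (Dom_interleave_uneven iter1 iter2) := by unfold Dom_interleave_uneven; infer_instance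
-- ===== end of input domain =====

-- B: idiomatic zip_longest-with-sentinel + chain + filter, instead of A's explicit pop(0)/yield loop.
-- ===== PORT A =====
-- while 1: if list1: yield list1.pop(0) else: yield from list2; return; if list2: yield list2.pop(0) else: yield from list1; return
def interleave_uneven (iter1 : List Int) (iter2 : List Int) : List Int :=
  match iter1 with
  | [] => iter2
  | x :: list1 =>
    x :: (match iter2 with
          | [] => list1
          | y :: list2 => y :: interleave_uneven list1 list2)

-- ===== PORT B =====
-- zip_longest with a sentinel fillvalue (ported as Option, none = sentinel)
def pyZipLongest (l1 l2 : List Int) : List (Option Int × Option Int) :=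
  match l1, l2 with
  | [], [] => []
  | [], y :: ys => (none, some y) :: pyZipLongest [] ys
  | x :: xs, [] => (some x, none) :: pyZipLongest xs []
  | x :: xs, y :: ys => (some x, some y) :: pyZipLongest xs ys

-- chain.from_iterable over the pairs, keeping each element that is not the sentinel
def interleave_uneven_alt (iter1 : List Int) (iter2 : List Int) : List Int :=
  ((pyZipLongest iter1 iter2).flatMap (fun p => [p.1, p.2])).filterMap id

-- ===== PRECONDITION & SPEC =====
def Spec_interleave_uneven (iter1 : List Int) (iter2 : List Int) (out : List Int) : Prop := out = interleave_uneven_alt iter1 iter2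
instance (iter1 : List Int) (iter2 : List Int) (out : List Int) : Decidable (Spec_interleave_uneven iter1 iter2 out) := by unfold Spec_interleave_uneven; infer_instance

-- ===== CLAIM (what is proved, stated in full; the proofs are below) =====
def Claim_equal_interleave_uneven : Prop := ∀ (iter1 : List Int) (iter2 : List Int), Dom_interleave_uneven iter1 iter2 → Spec_interleave_uneven iter1 iter2 (interleave_uneven iter1 iter2)

-- ===== LEMMAS AND PROOFS =====

-- ===== VERDICT (by name: the statement is the Claim_ definition above) =====
theorem interleave_nil_right (l : List Int) : interleave_uneven l [] = l := by
  cases l <;> simp [interleave_uneven]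

theorem interleave_eq (l1 l2 : List Int) :
    interleave_uneven l1 l2 = interleave_uneven_alt l1 l2 := by
  induction l1 generalizing l2 with
  | nil =>
    induction l2 with
    | nil => simp [interleave_uneven, interleave_uneven_alt, pyZipLongest]
    | cons y ys ih => simpa [interleave_uneven, interleave_uneven_alt, pyZipLongest] using ih
  | cons x xs ih =>
    cases l2 with
    | nil =>
      have h := ih []
      rw [interleave_nil_right] at h
      simp [interleave_uneven, interleave_uneven_alt, pyZipLongest] at h ⊢
      exact h
    | cons y ys =>
      have h := ih ys
      simp [interleave_uneven, interleave_uneven_alt, pyZipLongest] at h ⊢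
      exact h

theorem interleave_uneven_spec : Claim_equal_interleave_uneven :=
  fun l1 l2 _ => interleave_eq l1 l2
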